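-- pv_equiv track=rewrite | github.com/testing5586/LynkerAi_Beta_1.2 | lynker_bazi_engine/engines/time_match_agent.py | build_criteria_text
-- ===== SOURCE A (Python) =====
-- def build_criteria_text(mode: str):
--     """构建中文匹配层级说明 (7-Level Structure)"""
--     steps = [
--         ("same_year", "同年"),
--         ("same_month", "同月"),
--         ("same_day", "同日"),
--         ("same_shichen", "同时辰"),   # ✅ NEW: 文化维度
--         ("same_hour", "同小时"),      # ✅ Updated
--         ("same_quarter", "同刻"),     # ✅ Renamed (15分钟)
--         ("same_minute", "同分"),      # ✅ Renamed (分钟级)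
--     ]
--     active_idx = next((i for i, s in enumerate(steps) if s[0] == mode), -1)
--     return " + ".join(steps[i][1] for i in range(active_idx + 1))
-- ===== SOURCE B (Python) =====
-- # Precomputed lookup table: each mode maps directly to its full joined description.
-- _CRITERIA_TEXT = {
--     "same_year": "同年",
--     "same_month": "同年 + 同月",
--     "same_day": "同年 + 同月 + 同日",
--     "same_shichen": "同年 + 同月 + 同日 + 同时辰",
--     "same_hour": "同年 + 同月 + 同日 + 同时辰 + 同小时",
--     "same_quarter": "同年 + 同月 + 同日 + 同时辰 + 同小时 + 同刻",
--     "same_minute": "同年 + 同月 + 同日 + 同时辰 + 同小时 + 同刻 + 同分",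
-- }
--
-- def build_criteria_text(mode: str):
--     """构建中文匹配层级说明 (7-Level Structure)"""
--     return _CRITERIA_TEXT.get(mode, "")
-- ===== Notes on version B (the rewrite author's own statement) =====
-- stated objective: simpler
-- what changed: Replaces A's runtime scan (find matching index via enumerate with a -1 sentinel, then re-index over range(idx+1) and join) by a single precomputed mode->description lookup table queried with dict.get, eliminating all per-call looping and joining.
import Mathlib
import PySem

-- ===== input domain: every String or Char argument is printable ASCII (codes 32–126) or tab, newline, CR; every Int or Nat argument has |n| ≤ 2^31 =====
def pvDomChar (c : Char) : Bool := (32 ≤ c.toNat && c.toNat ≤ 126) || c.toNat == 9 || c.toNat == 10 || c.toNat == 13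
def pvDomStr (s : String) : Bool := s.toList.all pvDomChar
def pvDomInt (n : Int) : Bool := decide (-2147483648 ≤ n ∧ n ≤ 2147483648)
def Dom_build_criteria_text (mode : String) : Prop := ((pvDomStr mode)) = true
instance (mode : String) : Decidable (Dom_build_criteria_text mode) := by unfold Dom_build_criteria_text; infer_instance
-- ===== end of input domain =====

-- B replaces A's scan-find-index + range-slice-and-join by a precomputed mode->description
-- lookup table queried once with dict.get; objective: simpler (no per-call loop or join).

-- ===== PORT A =====
-- next((i for i, s in enumerate(steps) if s[0] == mode), -1)
def pvNextIdxA : List (Int × (String × String)) → String → Int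
  | [], _ => -1
  | (i, s) :: t, mode => if s.1 == mode then i else pvNextIdxA t mode

def build_criteria_text (mode : String) : String :=
  let steps : List (String × String) :=
    [("same_year", "同年"), ("same_month", "同月"), ("same_day", "同日"),
     ("same_shichen", "同时辰"), ("same_hour", "同小时"),
     ("same_quarter", "同刻"), ("same_minute", "同分")]
  let active_idx := pvNextIdxA (PySem.List.enumerate steps 0) mode
  PySem.Str.join " + "
    ((PySem.List.pyRange 0 (active_idx + 1) 1).map
      (fun i => (PySem.List.pyGetD steps i ("", "")).2))

-- ===== PORT B =====
-- _CRITERIA_TEXT.get(mode, "") on the literal precomputed table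
def pvCriteriaTable : PySem.Dict String String :=
  PySem.Dict.mk
  [("same_year", "同年"),
   ("same_month", "同年 + 同月"),
   ("same_day", "同年 + 同月 + 同日"),
   ("same_shichen", "同年 + 同月 + 同日 + 同时辰"),
   ("same_hour", "同年 + 同月 + 同日 + 同时辰 + 同小时"),
   ("same_quarter", "同年 + 同月 + 同日 + 同时辰 + 同小时 + 同刻"),
   ("same_minute", "同年 + 同月 + 同日 + 同时辰 + 同小时 + 同刻 + 同分")]

def build_criteria_text_alt (mode : String) : String :=
  PySem.Dict.getD pvCriteriaTable mode ""

-- ===== PRECONDITION & SPEC =====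
def Spec_build_criteria_text (mode : String) (out : String) : Prop := out = build_criteria_text_alt mode
instance (mode : String) (out : String) : Decidable (Spec_build_criteria_text mode out) := by unfold Spec_build_criteria_text; infer_instance

-- ===== CLAIM =====
def Claim_equal_build_criteria_text : Prop := ∀ (mode : String), Dom_build_criteria_text mode → Spec_build_criteria_text mode (build_criteria_text mode)

-- ===== LEMMAS AND PROOFS =====

-- ===== VERDICT =====
theorem build_criteria_text_spec : Claim_equal_build_criteria_text := by
  intro mode _
  unfold Spec_build_criteria_text
  by_cases h1 : mode = "same_year"; · subst h1; decide
  by_cases h2 : mode = "same_month"; · subst h2; decide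
  by_cases h3 : mode = "same_day"; · subst h3; decide
  by_cases h4 : mode = "same_shichen"; · subst h4; decide
  by_cases h5 : mode = "same_hour"; · subst h5; decide
  by_cases h6 : mode = "same_quarter"; · subst h6; decide
  by_cases h7 : mode = "same_minute"; · subst h7; decide
  simp [build_criteria_text, build_criteria_text_alt, pvNextIdxA,
    pvCriteriaTable, PySem.Dict.getD_eq_get?_getD,
    PySem.Dict.get?,
    PySem.List.enumerate, Ne.symm h1, Ne.symm h2, Ne.symm h3, Ne.symm h4,
    Ne.symm h5, Ne.symm h6, Ne.symm h7, PySem.List.pyRange_one_eq_nil,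
    PySem.Str.join]
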